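-- pv_equiv track=rewrite | github.com/maxkeiff/espy | espy/algorithms/cc_viterbi.py | cc_encode
-- ===== SOURCE A (Python) =====
-- def xor(bit0,bit1):
--     if bit0 == bit1:
--         return "0"
--     else:
--         return "1"
--
-- def cc_encode(message, constraint_length = 3, punctured = False):
--     """Encodes the given message using convolutional coding (by default with a rate of 1/2, using the generator polynomials 111 and 101)
--
--     Args:
--         message (str): a string consisting of 0s and 1s
--         constraint_length (int): number of bits used to calculate parity bits, default is 3 for a rate of 1/2
--         punctured (bool): whether puncturing is used or not (only available for rate constraint_length 3)
--
--     Returns: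
--         list: encoded message
--     """
--     #code rate 1/2 using 3[5,7]
--     enc_message =[]
--     if constraint_length == 3:
--         register = ["0","0","0"]
--
--         punct_count = 0
--         for t in range(0,len(message)):
--             #filling register
--             register[2]=register[1]
--             register[1]=register[0]
--
--             register[0]= message[t]
--
--             #applying generator polynomials 111 and 101
--             if punctured == False:
--                 enc_message.append(xor(xor(register[0],register[1]),register[2])+xor(register[0],register[2]))
--             else:
--                 #puncturing code, using the puncturing matrix consisting of the rows (110) and (101), thus resulting in rate 3/4
--                 if punct_count == 0:
--                     enc_message.append(xor(xor(register[0],register[1]),register[2])+xor(register[0],register[2]))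
--                     punct_count = (punct_count+1)%3
--                 elif punct_count == 1:
--                     enc_message.append(xor(xor(register[0],register[1]),register[2]))
--                     punct_count = (punct_count+1)%3
--                 else:
--                     enc_message.append(xor(register[0],register[2]))
--                     punct_count = (punct_count+1)%3
--
--     #code rate 1/4 using
--     elif constraint_length == 4:
--         register = ["0","0","0","0"]
--         for t in range(0,len(message)):
--             #filling register
--             register[3]=register[2]
--             register[2]=register[1]
--             register[1]=register[0]
--
--             register[0]= message[t]
--
--             #applying generator polynomials 1001,1111,1110,1011
--             enc_bit=""
--             enc_bit += xor(register[0],register[3])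
--             enc_bit += xor(xor(xor(register[0],register[1]),register[2]),register[3])
--             enc_bit += xor(xor(register[0],register[1]),register[2])
--             enc_bit += xor(xor(register[0],register[2]),register[3])
--             enc_message.append(enc_bit)
--
--     return enc_message
-- ===== SOURCE B (Python) =====
-- def cc_encode(message, constraint_length = 3, punctured = False):
--     """Staged 'shift-and-combine' re-implementation: instead of a per-position
--     shift register, build the whole delayed copies of the message up front
--     (left-padded with '0'), compute each generator polynomial's parity stream as
--     a full pass over the zipped delayed streams, and interleave / puncture the
--     finished streams in a final pass."""
--     def x(a, b):
--         return "0" if a == b else "1"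
--     n = len(message)
--     d0 = message
--     d1 = ("0" + message)[:n]
--     d2 = ("00" + message)[:n]
--     if constraint_length == 3:
--         s1 = [x(x(a, b), c) for a, b, c in zip(d0, d1, d2)]
--         s2 = [x(a, c) for a, c in zip(d0, d2)]
--         if not punctured:
--             return [p + q for p, q in zip(s1, s2)]
--         return [p + q if t % 3 == 0 else (p if t % 3 == 1 else q)
--                 for t, (p, q) in enumerate(zip(s1, s2))]
--     if constraint_length == 4:
--         d3 = ("000" + message)[:n]
--         s1 = [x(a, d) for a, d in zip(d0, d3)]
--         s2 = [x(x(x(a, b), c), d) for a, b, c, d in zip(d0, d1, d2, d3)]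
--         s3 = [x(x(a, b), c) for a, b, c in zip(d0, d1, d2)]
--         s4 = [x(x(a, c), d) for a, c, d in zip(d0, d2, d3)]
--         return [a + b + c + d for a, b, c, d in zip(s1, s2, s3, s4)]
--     return []
-- ===== Notes on version B (the rewrite author's own statement) =====
-- stated objective: alternative
-- what changed: Replaces the single-pass mutable shift register and puncture counter with a staged shift-and-combine pipeline: build the zero-padded delayed copies of the whole message first, compute each generator polynomial's parity stream as its own full pass, then interleave/puncture the finished streams in a final pass keyed by t % 3.
import Mathlib
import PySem

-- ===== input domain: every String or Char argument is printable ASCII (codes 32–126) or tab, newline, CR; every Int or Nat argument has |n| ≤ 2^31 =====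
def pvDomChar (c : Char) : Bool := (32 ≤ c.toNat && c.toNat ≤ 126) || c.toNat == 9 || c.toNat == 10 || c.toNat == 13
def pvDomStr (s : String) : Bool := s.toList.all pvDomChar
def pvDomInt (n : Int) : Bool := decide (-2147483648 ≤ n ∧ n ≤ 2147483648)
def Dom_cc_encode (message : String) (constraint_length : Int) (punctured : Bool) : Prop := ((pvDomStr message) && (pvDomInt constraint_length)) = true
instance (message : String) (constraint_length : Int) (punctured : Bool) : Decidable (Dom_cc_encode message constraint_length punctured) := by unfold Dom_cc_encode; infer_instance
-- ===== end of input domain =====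

-- B replaces A's single-pass mutable shift register and puncture counter with a staged
-- shift-and-combine pipeline: padded delayed copies of the whole message, one full pass
-- per generator polynomial producing its parity stream, and a final interleave/puncture
-- pass keyed by t % 3 (alternative decomposition, same cost).

-- ===== PORT A =====
-- Python's xor helper: single-char strings compared for equality, result "0"/"1"
def xorC (a b : Char) : Char := if a = b then '0' else '1'

-- the constraint_length == 3 loop: state = register (r0,r1,r2) and punct_count
def ccLoop3 (rest : List Char) (r0 r1 r2 : Char) (punctured : Bool) (pc : Nat) : List String :=
  match rest with
  | [] => []
  | c :: rest' =>
    let r2' := r1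
    let r1' := r0
    let r0' := c
    if punctured = false then
      String.mk [xorC (xorC r0' r1') r2', xorC r0' r2'] :: ccLoop3 rest' r0' r1' r2' punctured pc
    else if pc = 0 then
      String.mk [xorC (xorC r0' r1') r2', xorC r0' r2'] :: ccLoop3 rest' r0' r1' r2' punctured ((pc+1) % 3)
    else if pc = 1 then
      String.mk [xorC (xorC r0' r1') r2'] :: ccLoop3 rest' r0' r1' r2' punctured ((pc+1) % 3)
    else
      String.mk [xorC r0' r2'] :: ccLoop3 rest' r0' r1' r2' punctured ((pc+1) % 3)

-- the constraint_length == 4 loop: state = register (r0,r1,r2,r3)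
def ccLoop4 (rest : List Char) (r0 r1 r2 r3 : Char) : List String :=
  match rest with
  | [] => []
  | c :: rest' =>
    let r3' := r2
    let r2' := r1
    let r1' := r0
    let r0' := c
    String.mk [xorC r0' r3',
               xorC (xorC (xorC r0' r1') r2') r3',
               xorC (xorC r0' r1') r2',
               xorC (xorC r0' r2') r3'] :: ccLoop4 rest' r0' r1' r2' r3'

def cc_encode (message : String) (constraint_length : Int) (punctured : Bool) : List String :=
  if constraint_length = 3 then
    ccLoop3 message.toList '0' '0' '0' punctured 0
  else if constraint_length = 4 then
    ccLoop4 message.toList '0' '0' '0' '0'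
  else []

-- ===== PORT B =====
-- Python's zip over three / four lists
def zip3 {α β γ : Type} : List α → List β → List γ → List (α × β × γ)
  | a :: as, b :: bs, c :: cs => (a, b, c) :: zip3 as bs cs
  | _, _, _ => []

def zip4 {α β γ δ : Type} : List α → List β → List γ → List δ → List (α × β × γ × δ)
  | a :: as, b :: bs, c :: cs, d :: ds => (a, b, c, d) :: zip4 as bs cs ds
  | _, _, _, _ => []

def cc_encode_alt (message : String) (constraint_length : Int) (punctured : Bool) : List String :=
  let l := message.toList
  let n := l.length
  let d0 := l
  let d1 := ('0' :: l).take n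
  let d2 := ('0' :: '0' :: l).take n
  if constraint_length = 3 then
    let s1 := (zip3 d0 d1 d2).map (fun p => xorC (xorC p.1 p.2.1) p.2.2)
    let s2 := (d0.zip d2).map (fun p => xorC p.1 p.2)
    if punctured = false then
      (s1.zip s2).map (fun p => String.mk [p.1, p.2])
    else
      (PySem.List.enumerate (s1.zip s2)).map (fun tp =>
        if PySem.Int.mod tp.1 3 = 0 then String.mk [tp.2.1, tp.2.2]
        else if PySem.Int.mod tp.1 3 = 1 then String.mk [tp.2.1]
        else String.mk [tp.2.2])
  else if constraint_length = 4 then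
    let d3 := ('0' :: '0' :: '0' :: l).take n
    let s1 := (d0.zip d3).map (fun p => xorC p.1 p.2)
    let s2 := (zip4 d0 d1 d2 d3).map (fun p => xorC (xorC (xorC p.1 p.2.1) p.2.2.1) p.2.2.2)
    let s3 := (zip3 d0 d1 d2).map (fun p => xorC (xorC p.1 p.2.1) p.2.2)
    let s4 := (zip3 d0 d2 d3).map (fun p => xorC (xorC p.1 p.2.1) p.2.2)
    (zip4 s1 s2 s3 s4).map (fun p => String.mk [p.1, p.2.1, p.2.2.1, p.2.2.2])
  else []

-- ===== PRECONDITION & SPEC =====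
def Spec_cc_encode (message : String) (constraint_length : Int) (punctured : Bool) (out : List String) : Prop := out = cc_encode_alt message constraint_length punctured
instance (message : String) (constraint_length : Int) (punctured : Bool) (out : List String) : Decidable (Spec_cc_encode message constraint_length punctured out) := by unfold Spec_cc_encode; infer_instance

-- ===== CLAIM (what is proved, stated in full; the proofs are below) =====
def Claim_equal_cc_encode : Prop := ∀ (message : String) (constraint_length : Int) (punctured : Bool), Dom_cc_encode message constraint_length punctured → Spec_cc_encode message constraint_length punctured (cc_encode message constraint_length punctured)

-- ===== LEMMAS AND PROOFS =====

-- proof-only helpers: the per-position window/group characterisation both ports are reduced to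
def wbit (l : List Char) (t i : Nat) : Char :=
  if i ≤ t then l.getD (t - i) '0' else '0'

def bGroup3 (l : List Char) (punctured : Bool) (t : Nat) : String :=
  let p1 := xorC (xorC (wbit l t 0) (wbit l t 1)) (wbit l t 2)
  let p2 := xorC (wbit l t 0) (wbit l t 2)
  if punctured = false then String.mk [p1, p2]
  else if t % 3 = 0 then String.mk [p1, p2]
  else if t % 3 = 1 then String.mk [p1]
  else String.mk [p2]

def bGroup4 (l : List Char) (t : Nat) : String :=
  let a := wbit l t 0
  let b := wbit l t 1
  let c := wbit l t 2
  let d := wbit l t 3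
  String.mk [xorC a d, xorC (xorC (xorC a b) c) d, xorC (xorC a b) c, xorC (xorC a c) d]

lemma wbit_succ (l : List Char) (t i : Nat) : wbit l (t + 1) (i + 1) = wbit l t i := by
  simp [wbit, Nat.succ_sub_succ]

lemma loop3_eq (l : List Char) (punctured : Bool) :
    ∀ n t r2 pc, l.length - t = n → (punctured = true → pc = t % 3) →
      ccLoop3 (l.drop t) (wbit l t 1) (wbit l t 2) r2 punctured pc
        = (List.range' t n).map (bGroup3 l punctured) := by
  intro n
  induction n with
  | zero =>
    intro t r2 pc hn _
    have : l.drop t = [] := List.drop_eq_nil_of_le (by omega)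
    simp [this, ccLoop3]
  | succ m ih =>
    intro t r2 pc hn hpc
    have ht : t < l.length := by omega
    have hdrop : l.drop t = l[t] :: l.drop (t + 1) := List.drop_eq_getElem_cons ht
    have hw0 : wbit l t 0 = l[t] := by
      simp [wbit, List.getD_eq_getElem?_getD, List.getElem?_eq_getElem ht]
    have hw1 : wbit l t 1 = wbit l (t + 1) 2 := (wbit_succ l t 1).symm
    have hw0' : l[t] = wbit l (t + 1) 1 := by
      rw [wbit_succ l t 0, hw0.symm]
    have hrange : List.range' t (m + 1) = t :: List.range' (t + 1) m := List.range'_succ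
    rw [hdrop, hrange]
    by_cases hp : punctured = true
    · subst hp
      have hpc' := hpc rfl
      subst hpc'
      have hmod : (t % 3 + 1) % 3 = (t + 1) % 3 := by omega
      simp only [ccLoop3, Bool.true_eq_false, if_false]
      rw [hw1, hw0', hmod,
          ih (t + 1) (wbit l t 2) ((t + 1) % 3) (by omega) (fun _ => rfl)]
      by_cases h0 : t % 3 = 0
      · simp [h0, bGroup3, hw0, hw0', hw1]
      · by_cases h1 : t % 3 = 1
        · simp [h0, h1, bGroup3, hw0, hw0', hw1]
        · simp [h0, h1, bGroup3, hw0, hw0', hw1]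
    · have hp' : punctured = false := by simpa using hp
      subst hp'
      simp only [ccLoop3, if_pos rfl]
      rw [hw1, hw0',
          ih (t + 1) (wbit l t 2) pc (by omega) (by simp)]
      simp [bGroup3, hw0, hw0', hw1]

lemma loop4_eq (l : List Char) :
    ∀ n t r3, l.length - t = n →
      ccLoop4 (l.drop t) (wbit l t 1) (wbit l t 2) (wbit l t 3) r3
        = (List.range' t n).map (bGroup4 l) := by
  intro n
  induction n with
  | zero =>
    intro t r3 hn
    have : l.drop t = [] := List.drop_eq_nil_of_le (by omega)
    simp [this, ccLoop4]
  | succ m ih =>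
    intro t r3 hn
    have ht : t < l.length := by omega
    have hdrop : l.drop t = l[t] :: l.drop (t + 1) := List.drop_eq_getElem_cons ht
    have hw0 : wbit l t 0 = l[t] := by
      simp [wbit, List.getD_eq_getElem?_getD, List.getElem?_eq_getElem ht]
    have hw0' : l[t] = wbit l (t + 1) 1 := by
      rw [wbit_succ l t 0, hw0.symm]
    have hw1 : wbit l t 1 = wbit l (t + 1) 2 := (wbit_succ l t 1).symm
    have hw2 : wbit l t 2 = wbit l (t + 1) 3 := (wbit_succ l t 2).symm
    rw [hdrop, (List.range'_succ : List.range' t (m + 1) = t :: List.range' (t + 1) m)]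
    simp only [ccLoop4]
    rw [hw0', hw1, hw2, ih (t + 1) (wbit l t 3) (by omega)]
    simp [bGroup4, hw0, hw0', hw1, hw2]

lemma wbit_zero (l : List Char) (i : Nat) (hi : 1 ≤ i) : wbit l 0 i = '0' := by
  simp [wbit]; omega

-- B-side: getElem? of the padded delayed copies
lemma pad_getElem? (k : Nat) (l : List Char) (t : Nat) :
    ((List.replicate k '0' ++ l).take l.length)[t]? =
      if t < l.length then some (wbit l t k) else none := by
  by_cases ht : t < l.length
  · rw [List.getElem?_take_of_lt ht, if_pos ht]
    by_cases hk : t < k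
    · rw [List.getElem?_append_left (by simpa using hk)]
      simp [hk, wbit]
    · rw [List.getElem?_append_right (by simp; omega)]
      simp only [List.length_replicate]
      have hww : wbit l t k = l[t - k]'(by omega) := by
        rw [wbit, if_pos (by omega), List.getD_eq_getElem?_getD,
            List.getElem?_eq_getElem (by omega)]
        rfl
      rw [hww, List.getElem?_eq_getElem (by omega)]
  · rw [if_neg ht]
    rw [List.getElem?_eq_none_iff]
    simp
    omega

lemma zip3_getElem? {α β γ : Type} (as : List α) (bs : List β) (cs : List γ) (i : Nat) :
    (zip3 as bs cs)[i]? =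
      as[i]?.bind fun a => bs[i]?.bind fun b => cs[i]?.map fun c => (a, b, c) := by
  induction as generalizing bs cs i with
  | nil => simp [zip3]
  | cons a as ih =>
    cases bs with
    | nil => cases (a :: as)[i]? <;> simp [zip3]
    | cons b bs =>
      cases cs with
      | nil =>
        cases h : (a :: as)[i]? <;> cases h' : (b :: bs)[i]? <;> simp [zip3]
      | cons c cs =>
        cases i with
        | zero => simp [zip3]
        | succ j => simpa [zip3] using ih bs cs j

lemma zip4_getElem? {α β γ δ : Type} (as : List α) (bs : List β) (cs : List γ) (ds : List δ) (i : Nat) :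
    (zip4 as bs cs ds)[i]? =
      as[i]?.bind fun a => bs[i]?.bind fun b => cs[i]?.bind fun c => ds[i]?.map fun d => (a, b, c, d) := by
  induction as generalizing bs cs ds i with
  | nil => simp [zip4]
  | cons a as ih =>
    cases bs with
    | nil => cases (a :: as)[i]? <;> simp [zip4]
    | cons b bs =>
      cases cs with
      | nil =>
        cases h : (a :: as)[i]? <;> cases h' : (b :: bs)[i]? <;> simp [zip4]
      | cons c cs =>
        cases ds with
        | nil =>
          cases h : (a :: as)[i]? <;> cases h' : (b :: bs)[i]? <;>
            cases h'' : (c :: cs)[i]? <;> simp [zip4]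
        | cons d ds =>
          cases i with
          | zero => simp [zip4]
          | succ j => simpa [zip4] using ih bs cs ds j

lemma zip_getElem? {α β : Type} (as : List α) (bs : List β) (i : Nat) :
    (as.zip bs)[i]? = as[i]?.bind fun a => bs[i]?.map fun b => (a, b) := by
  induction as generalizing bs i with
  | nil => simp
  | cons a as ih =>
    cases bs with
    | nil => cases (a :: as)[i]? <;> simp
    | cons b bs =>
      cases i with
      | zero => simp
      | succ j => simpa using ih bs j

lemma pad1_getElem? (l : List Char) (t : Nat) :
    ((('0' :: l).take l.length))[t]? = if t < l.length then some (wbit l t 1) else none := by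
  simpa [List.replicate] using pad_getElem? 1 l t

lemma pad2_getElem? (l : List Char) (t : Nat) :
    ((('0' :: '0' :: l).take l.length))[t]? = if t < l.length then some (wbit l t 2) else none := by
  simpa [List.replicate] using pad_getElem? 2 l t

lemma pad3_getElem? (l : List Char) (t : Nat) :
    ((('0' :: '0' :: '0' :: l).take l.length))[t]? = if t < l.length then some (wbit l t 3) else none := by
  simpa [List.replicate] using pad_getElem? 3 l t

lemma self_getElem? (l : List Char) (t : Nat) :
    l[t]? = if t < l.length then some (wbit l t 0) else none := by
  by_cases ht : t < l.length
  · rw [if_pos ht, List.getElem?_eq_getElem ht]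
    simp [wbit, List.getD_eq_getElem?_getD, List.getElem?_eq_getElem ht]
  · rw [if_neg ht, List.getElem?_eq_none_iff]
    omega

lemma alt3_eq (l : List Char) (punctured : Bool) :
    (let n := l.length
     let d0 := l
     let d1 := ('0' :: l).take n
     let d2 := ('0' :: '0' :: l).take n
     let s1 := (zip3 d0 d1 d2).map (fun p => xorC (xorC p.1 p.2.1) p.2.2)
     let s2 := (d0.zip d2).map (fun p => xorC p.1 p.2)
     if punctured = false then
       (s1.zip s2).map (fun p => String.mk [p.1, p.2])
     else
       (PySem.List.enumerate (s1.zip s2)).map (fun tp =>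
         if PySem.Int.mod tp.1 3 = 0 then String.mk [tp.2.1, tp.2.2]
         else if PySem.Int.mod tp.1 3 = 1 then String.mk [tp.2.1]
         else String.mk [tp.2.2]))
      = (List.range l.length).map (bGroup3 l punctured) := by
  dsimp only
  by_cases hp : punctured = false
  · rw [if_pos hp]
    apply List.ext_getElem?
    intro t
    simp only [List.getElem?_map, zip_getElem?, zip3_getElem?, pad1_getElem?, pad2_getElem?]
    simp only [self_getElem?]
    by_cases ht : t < l.length
    · simp [ht, hp, List.getElem?_range, bGroup3]
    · simp [ht, List.getElem?_range]
  · rw [if_neg hp]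
    have hp' : punctured = true := by simpa using hp
    subst hp'
    apply List.ext_getElem?
    intro t
    simp only [List.getElem?_map, PySem.List.getElem?_enumerate,
      zip_getElem?, zip3_getElem?, pad1_getElem?, pad2_getElem?]
    simp only [self_getElem?]
    by_cases ht : t < l.length
    · have hmod : PySem.Int.mod ((0 : Int) + (t : Nat)) 3 = ((t % 3 : Nat) : Int) := by
        rw [PySem.Int.mod_eq_emod_of_pos (by omega)]
        omega
      simp only [ht, if_true, Option.bind_some, Option.map_some,
        List.getElem?_range ht, hmod]
      by_cases h0 : t % 3 = 0
      · have d1 : (3 : Int) ∣ ((t : Nat) : Int) := by omega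
        simp [d1, h0, bGroup3]
      · by_cases hh1 : t % 3 = 1
        · have d1 : ¬ (3 : Int) ∣ ((t : Nat) : Int) := by omega
          have d2 : ((t : Nat) : Int) % 3 = 1 := by omega
          simp [d1, d2, h0, hh1, bGroup3]
        · have d1 : ¬ (3 : Int) ∣ ((t : Nat) : Int) := by omega
          have d2 : ¬ ((t : Nat) : Int) % 3 = 1 := by omega
          simp [d1, d2, h0, hh1, bGroup3]
    · simp [ht, List.getElem?_range]

lemma alt4_eq (l : List Char) :
    (let n := l.length
     let d0 := l
     let d1 := ('0' :: l).take n
     let d2 := ('0' :: '0' :: l).take n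
     let d3 := ('0' :: '0' :: '0' :: l).take n
     let s1 := (d0.zip d3).map (fun p => xorC p.1 p.2)
     let s2 := (zip4 d0 d1 d2 d3).map (fun p => xorC (xorC (xorC p.1 p.2.1) p.2.2.1) p.2.2.2)
     let s3 := (zip3 d0 d1 d2).map (fun p => xorC (xorC p.1 p.2.1) p.2.2)
     let s4 := (zip3 d0 d2 d3).map (fun p => xorC (xorC p.1 p.2.1) p.2.2)
     (zip4 s1 s2 s3 s4).map (fun p => String.mk [p.1, p.2.1, p.2.2.1, p.2.2.2]))
      = (List.range l.length).map (bGroup4 l) := by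
  dsimp only
  apply List.ext_getElem?
  intro t
  simp only [List.getElem?_map, zip_getElem?, zip3_getElem?, zip4_getElem?,
    pad1_getElem?, pad2_getElem?, pad3_getElem?]
  simp only [self_getElem?]
  by_cases ht : t < l.length
  · simp [ht, List.getElem?_range, bGroup4]
  · simp [ht, List.getElem?_range]

-- ===== VERDICT (by name: the statement is the Claim_ definition above) =====
theorem cc_encode_spec : Claim_equal_cc_encode := by
  intro message constraint_length punctured _
  unfold Spec_cc_encode cc_encode cc_encode_alt
  set l := message.toList with hl
  by_cases h3 : constraint_length = 3
  · have h := loop3_eq l punctured l.length 0 '0' 0 (by omega) (by simp)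
    rw [wbit_zero l 1 (by omega), wbit_zero l 2 (by omega), List.drop_zero] at h
    rw [if_pos h3, if_pos h3, h, ← List.range_eq_range']
    exact (alt3_eq l punctured).symm
  · by_cases h4 : constraint_length = 4
    · have h := loop4_eq l l.length 0 '0' (by omega)
      rw [wbit_zero l 1 (by omega), wbit_zero l 2 (by omega), wbit_zero l 3 (by omega),
          List.drop_zero] at h
      rw [if_neg h3, if_neg h3, if_pos h4, if_pos h4, h, ← List.range_eq_range']
      exact (alt4_eq l).symm
    · simp [h3, h4]
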